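-- pv_equiv track=rewrite | github.com/dbateyko/offprint | offprint/coverage_tools/live_crawl.py | _pick_sample
-- ===== SOURCE A (Python) =====
-- from typing import Dict, Iterable, List, Optional, Sequence, Set, Tuple
--
-- def _pick_sample(items: Sequence[str], k: int) -> List[str]:
--     if k <= 0:
--         return []
--     if len(items) <= k:
--         return list(items)
--     # Deterministic spread: first, quarter, middle, three-quarter, last...
--     idxs = [0, len(items) // 4, len(items) // 2, (3 * len(items)) // 4, len(items) - 1]
--     out: List[str] = []
--     for i in idxs:
--         if len(out) >= k:
--             break
--         u = items[i]
--         if u not in out: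
--             out.append(u)
--     # If still short, fill from the front.
--     for u in items:
--         if len(out) >= k:
--             break
--         if u not in out:
--             out.append(u)
--     return out[:k]
-- ===== SOURCE B (Python) =====
-- from typing import List, Sequence
--
-- def _pick_sample(items: Sequence[str], k: int) -> List[str]:
--     if k <= 0:
--         return []
--     n = len(items)
--     if n <= k:
--         return list(items)
--     # worklist = anchor values followed by all items; repeatedly emit the head
--     # and purge its duplicates from the remaining worklist (no membership test on out)
--     rest = [items[0], items[n // 4], items[n // 2], items[(3 * n) // 4], items[n - 1]]
--     rest += list(items)
--     out: List[str] = []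
--     remaining = k
--     while remaining > 0 and rest:
--         head = rest[0]
--         out.append(head)
--         rest = [x for x in rest[1:] if x != head]
--         remaining -= 1
--     return out
-- ===== Notes on version B (the rewrite author's own statement) =====
-- stated objective: alternative
-- what changed: Replaces A's two interleaved loops that test membership in the growing output by a single worklist loop: anchor values followed by all items form one worklist, and each step emits the head and filters its duplicates out of the remaining worklist, so no 'u not in out' scan and no final [:k] cut exist.
import Mathlib
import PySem

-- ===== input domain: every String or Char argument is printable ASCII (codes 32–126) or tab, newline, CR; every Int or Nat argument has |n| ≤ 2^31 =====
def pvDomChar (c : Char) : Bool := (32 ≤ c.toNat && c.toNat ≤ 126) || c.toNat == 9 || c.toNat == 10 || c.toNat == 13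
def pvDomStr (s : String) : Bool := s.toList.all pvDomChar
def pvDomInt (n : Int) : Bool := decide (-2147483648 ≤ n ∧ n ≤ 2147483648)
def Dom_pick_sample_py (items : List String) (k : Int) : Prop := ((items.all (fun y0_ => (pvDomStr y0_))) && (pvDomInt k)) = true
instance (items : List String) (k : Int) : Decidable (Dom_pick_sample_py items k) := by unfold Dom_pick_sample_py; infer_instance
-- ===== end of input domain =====

-- B replaces A's two membership-scanning loops by one worklist loop that emits the head
-- and filters its duplicates out of the remaining worklist (objective: alternative, no speed claim).


-- ===== PORT A =====
-- first loop: 'for i in idxs: if len(out) >= k: break; u = items[i]; if u not in out: out.append(u)'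
-- (items[i] is ported as pyGetD with default "": under A's guards 0 < k < len(items), every i in idxs is in range)
def pickLoopIdx (items : List String) (k : Int) : List Int → List String → List String
  | [], out => out
  | i :: rest, out =>
    if k ≤ (out.length : Int) then out
    else
      let u := PySem.List.pyGetD items i ""
      pickLoopIdx items k rest (if out.contains u then out else out ++ [u])

-- second loop: 'for u in items: if len(out) >= k: break; if u not in out: out.append(u)'
def pickLoopFill (k : Int) : List String → List String → List String
  | [], out => out
  | u :: rest, out =>
    if k ≤ (out.length : Int) then out
    else pickLoopFill k rest (if out.contains u then out else out ++ [u])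

def pick_sample_py (items : List String) (k : Int) : List String :=
  if k ≤ 0 then []
  else if (items.length : Int) ≤ k then items
  else
    let n : Int := (items.length : Int)
    let idxs : List Int := [0, PySem.Int.floordiv n 4, PySem.Int.floordiv n 2,
                            PySem.Int.floordiv (3 * n) 4, n - 1]
    let out := pickLoopIdx items k idxs []
    let out := pickLoopFill k items out
    PySem.List.slice out none (some k)

-- ===== PORT B =====
-- 'while remaining > 0 and rest: head = rest[0]; out.append(head); rest = [x for x in rest[1:] if x != head]; remaining -= 1'
def takeLoop (rest : List String) (remaining : Int) (out : List String) : List String :=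
  if remaining ≤ 0 then out
  else
    match rest with
    | [] => out
    | head :: t => takeLoop (t.filter (fun x => x != head)) (remaining - 1) (out ++ [head])
termination_by rest.length
decreasing_by simp; exact List.length_filter_le _ t

def pick_sample_py_alt (items : List String) (k : Int) : List String :=
  if k ≤ 0 then []
  else if (items.length : Int) ≤ k then items
  else
    let n : Int := (items.length : Int)
    let rest := [PySem.List.pyGetD items 0 "", PySem.List.pyGetD items (PySem.Int.floordiv n 4) "",
                 PySem.List.pyGetD items (PySem.Int.floordiv n 2) "",
                 PySem.List.pyGetD items (PySem.Int.floordiv (3 * n) 4) "",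
                 PySem.List.pyGetD items (n - 1) ""] ++ items
    takeLoop rest k []

-- ===== PRECONDITION & SPEC =====
def Spec_pick_sample_py (items : List String) (k : Int) (out : List String) : Prop := out = pick_sample_py_alt items k
instance (items : List String) (k : Int) (out : List String) : Decidable (Spec_pick_sample_py items k out) := by unfold Spec_pick_sample_py; infer_instance

-- ===== CLAIM (what is proved, stated in full; the proofs are below) =====
def Claim_equal_pick_sample_py : Prop := ∀ (items : List String) (k : Int), Dom_pick_sample_py items k → Spec_pick_sample_py items k (pick_sample_py items k)

-- ===== LEMMAS AND PROOFS =====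

-- the index loop is the fill loop run on the fetched values
theorem pickLoopIdx_eq_fill (items : List String) (k : Int) :
    ∀ (is : List Int) (out : List String),
      pickLoopIdx items k is out
        = pickLoopFill k (is.map (fun i => PySem.List.pyGetD items i "")) out := by
  intro is
  induction is with
  | nil => intro out; rfl
  | cons i rest ih =>
      intro out
      simp only [pickLoopIdx, pickLoopFill, List.map_cons]
      split
      · rfl
      · exact ih _

theorem take_of_prefix_of_le {α : Type} {l l' : List α} (h : l <+: l') {m : Nat}
    (hm : m ≤ l.length) : l'.take m = l.take m := by
  obtain ⟨t, rfl⟩ := h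
  exact List.take_append_of_le_length hm

-- the accumulator is a prefix of the dedup fold's result
theorem prefix_foldl_add : ∀ (xs out : List String),
    out <+: List.foldl PySem.Set.add out xs := by
  intro xs
  induction xs with
  | nil => intro out; exact List.prefix_refl out
  | cons u rest ih =>
      intro out
      refine List.IsPrefix.trans ?_ (ih (PySem.Set.add out u))
      unfold PySem.Set.add
      split
      · exact List.prefix_refl out
      · exact List.prefix_append out [u]

-- while the accumulator is shorter than k, A's fill loop computes the dedup fold cut at k
theorem pickLoopFill_eq_take (k : Int) (hk : 0 < k) : ∀ (xs out : List String),
    out.length ≤ k.toNat →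
    pickLoopFill k xs out = (List.foldl PySem.Set.add out xs).take k.toNat := by
  intro xs
  induction xs with
  | nil =>
      intro out hout
      exact (List.take_of_length_le hout).symm
  | cons u rest ih =>
      intro out hout
      show pickLoopFill k (u :: rest) out = _
      rw [pickLoopFill]
      by_cases hfull : k ≤ (out.length : Int)
      · rw [if_pos hfull]
        have hlen : out.length = k.toNat := by omega
        have hpre : out <+: List.foldl PySem.Set.add out (u :: rest) := prefix_foldl_add _ _
        rw [take_of_prefix_of_le hpre (by omega), List.take_of_length_le (by omega)]
      · rw [if_neg hfull]
        have hstep : (if out.contains u then out else out ++ [u]) = PySem.Set.add out u := by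
          unfold PySem.Set.add; rfl
        rw [hstep]
        have hlen2 : (PySem.Set.add out u).length ≤ k.toNat := by
          unfold PySem.Set.add
          split
          · omega
          · simp; omega
        rw [ih (PySem.Set.add out u) hlen2]
        rfl

-- once the accumulator has length ≥ k, A's fill loop is the identity
theorem pickLoopFill_of_full (k : Int) (xs out : List String)
    (h : k ≤ (out.length : Int)) : pickLoopFill k xs out = out := by
  cases xs with
  | nil => rfl
  | cons u rest => simp [pickLoopFill, h]

-- pushing a fresh head into the dedup fold = head, then the fold on the head-filtered tail
theorem foldl_add_cons_filter : ∀ (t : List String) (h : String) (out : List String),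
    h ∉ out →
    List.foldl PySem.Set.add (h :: out) t
      = h :: List.foldl PySem.Set.add out (t.filter (fun x => x != h)) := by
  intro t
  induction t with
  | nil => intro h out _; rfl
  | cons u rest ih =>
      intro h out hfresh
      by_cases hu : u = h
      · subst hu
        have hadd : PySem.Set.add (u :: out) u = u :: out := by
          unfold PySem.Set.add; simp
        simp only [List.foldl_cons, hadd, List.filter_cons, bne_self_eq_false]
        exact ih u out hfresh
      · have hadd : PySem.Set.add (h :: out) u = h :: PySem.Set.add out u := by
          unfold PySem.Set.add PySem.Set.contains
          simp [hu]
          split <;> simp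
        have hfresh2 : h ∉ PySem.Set.add out u := by
          unfold PySem.Set.add
          split
          · exact hfresh
          · simp [hfresh, Ne.symm hu]
        have hkeep : (u != h) = true := by simp [hu]
        simp only [List.foldl_cons, hadd, List.filter_cons, hkeep, if_true]
        exact ih h (PySem.Set.add out u) hfresh2
  
-- B's worklist loop computes the dedup fold cut at the counter
theorem takeLoop_eq : ∀ (n : Nat) (seq : List String), seq.length ≤ n → ∀ (m : Int) (out : List String),
    takeLoop seq m out = out ++ (List.foldl PySem.Set.add [] seq).take m.toNat := by
  intro n
  induction n with
  | zero =>
      intro seq hlen m out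
      have : seq = [] := List.eq_nil_of_length_eq_zero (Nat.le_zero.mp hlen)
      subst this
      rw [takeLoop.eq_def]; split <;> simp
  | succ n ih =>
      intro seq hlen m out
      cases seq with
      | nil => rw [takeLoop.eq_def]; split <;> simp
      | cons h t =>
          rw [takeLoop.eq_def]
          by_cases hm : m ≤ 0
          · rw [if_pos hm]
            have : m.toNat = 0 := by omega
            simp [this]
          · rw [if_neg hm]
            have hred : (match h :: t with
                | [] => out
                | head :: t' => takeLoop (t'.filter (fun x => x != head)) (m - 1) (out ++ [head]))
              = takeLoop (t.filter (fun x => x != h)) (m - 1) (out ++ [h]) := rfl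
            rw [hred]
            have hflen : (t.filter (fun x => x != h)).length ≤ n := by
              have := List.length_filter_le (fun x => x != h) t
              simp at hlen; omega
            rw [ih _ hflen (m - 1) (out ++ [h])]
            have hfold : List.foldl PySem.Set.add [] (h :: t)
                = h :: List.foldl PySem.Set.add [] (t.filter (fun x => x != h)) := by
              have hadd0 : PySem.Set.add [] h = [h] := by unfold PySem.Set.add; simp
              rw [List.foldl_cons, hadd0]
              exact foldl_add_cons_filter t h [] (by simp)
            rw [hfold]
            have htn : m.toNat = (m - 1).toNat + 1 := by omega
            rw [htn, List.take_succ_cons, List.append_assoc]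
            rfl

-- ===== VERDICT (by name: the statement is the Claim_ definition above) =====
theorem pick_sample_py_spec : Claim_equal_pick_sample_py := by
  intro items k _
  unfold Spec_pick_sample_py pick_sample_py pick_sample_py_alt
  by_cases h0 : k ≤ 0
  · simp [h0]
  · simp only [h0, if_false]
    by_cases h1 : (items.length : Int) ≤ k
    · simp [h1]
    · simp only [h1, if_false]
      have hk : 0 < k := by omega
      rw [pickLoopIdx_eq_fill]
      simp only [List.map_cons, List.map_nil]
      generalize hmp : [PySem.List.pyGetD items 0 "",
          PySem.List.pyGetD items (PySem.Int.floordiv (items.length : Int) 4) "",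
          PySem.List.pyGetD items (PySem.Int.floordiv (items.length : Int) 2) "",
          PySem.List.pyGetD items (PySem.Int.floordiv (3 * (items.length : Int)) 4) "",
          PySem.List.pyGetD items ((items.length : Int) - 1) ""] = mp
      have hkc : k = ((k.toNat : Nat) : Int) := by omega
      rw [hkc, PySem.List.slice_to_natCast, ← hkc]
      rw [takeLoop_eq (mp ++ items).length _ (le_refl _) k []]
      rw [List.nil_append, List.foldl_append]
      rw [pickLoopFill_eq_take k hk mp [] (by simp)]
      by_cases hF : (List.foldl PySem.Set.add [] mp).length ≤ k.toNat
      · rw [List.take_of_length_le hF]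
        rw [pickLoopFill_eq_take k hk items _ hF]
        rw [List.take_take, min_self]
      · have h1 : ((List.foldl PySem.Set.add [] mp).take k.toNat).length = k.toNat := by
          simp; omega
        rw [pickLoopFill_of_full k items _ (by rw [h1]; omega)]
        rw [List.take_take, min_self]
        rw [take_of_prefix_of_le (prefix_foldl_add items _) (by omega)]
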